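-- pv_equiv track=rewrite | github.com/pypi-data/pypi-mirror-323 | packages/su-cs114-projectlibs/su_cs114_projectlibs-0.0.2-py3-none-any.whl/qrcodelib.py | _get_format_information_bits
-- ===== SOURCE A (Python) =====
-- INVALID_ERROR_CORRECTION_LEVEL = "Invalid data encoding pattern: {}"
--
-- INVALID_MASK_PATTERN = "Invalid error correction mask pattern: {}"
--
-- class ErrorCorrectionException(Exception):
--     def __init__(self, comment, obj=None):
--         super().__init__(comment)
--         self.obj = obj
--
-- error_correction_levels = {
--     "low": [0, 1],          # 7%
--     "medium": [0, 0],       # 14%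
--     "quartile": [1, 1],     # 25%
--     "high": [1, 0]          # 30%
-- }
--
-- def _xor_bits(a, b):
--     return [d ^ m for d, m in zip(a, b)]
--
-- def _bch_generator(data_bits):
--     """
--     The format information consists of a 15-bit sequence comprising 5 data bits and 10 BCH error correction bits.
--     The Bose-Chaudhuri-Hocquenghem (15,5) code shall be used for error correction. The polynomial
--     whose coefficient is the data bit string shall be divided by the generator polynomial
--     G(x) = x^10 + x^8 + x^5 + x^4 + x^2 + x + 1.
--     Source: https://franckybox.com/wp-content/uploads/qrcode.pdf"""
--     # Generator polynomial coefficients for g( x) = x^10 + x^8 + x^5 + x^4 + x^2 + x + 1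
--     generator_poly = [1, 0, 1, 0, 0, 1, 1, 0, 1, 1, 1]
--     # Append 10 zeros to the data_bits ( since the generator polynomial is of degree 10)
--     data_bits_extended = data_bits + [0] * 10
--
--     # Perform polynomial division ( modulo 2)
--     for i in range(len(data_bits)):
--         if data_bits_extended[i] == 1:     # Only if the bit is 1, we perform XOR with generator_poly
--             for j in range(len(generator_poly)):
--                 data_bits_extended[i + j] ^= generator_poly[j]
--
--     # The remainder is the parity bits
--     parity_bits = data_bits_extended[-10:]
--
--     # The final codeword is the concatenation of the original data_bits and the parity_bits
--     return data_bits + parity_bits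
--
-- def _get_format_information_bits(mask_pattern="111", err_level="medium", qr_type="normal"):
--     if err_level not in error_correction_levels:
--         raise ErrorCorrectionException(INVALID_ERROR_CORRECTION_LEVEL.format(err_level))
--     data_bits = error_correction_levels[err_level].copy()
--
--     if not mask_pattern or len(mask_pattern) != 3:
--         raise ErrorCorrectionException(INVALID_MASK_PATTERN.format(mask_pattern))
--
--     for i in mask_pattern:
--         if i not in ['0', '1']:
--             raise ErrorCorrectionException(INVALID_MASK_PATTERN.format(mask_pattern))
--
--     data_bits.extend([int(i) for i in mask_pattern])
--     codeword = _bch_generator(data_bits)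
--     mask_real = [1, 0, 1, 0, 1, 0, 0, 0, 0, 0, 1, 0, 0, 1, 0]
--     mask_micro = [1, 0, 0, 0, 1, 0, 0, 0, 1, 0, 0, 0, 1, 0, 1]
--     if qr_type == "micro":
--         return _xor_bits(codeword, mask_micro)
--     else:
--         return _xor_bits(codeword, mask_real)
-- ===== SOURCE B (Python) =====
-- INVALID_ERROR_CORRECTION_LEVEL = "Invalid data encoding pattern: {}"
-- INVALID_MASK_PATTERN = "Invalid error correction mask pattern: {}"
--
-- class ErrorCorrectionException(Exception):
--     def __init__(self, comment, obj=None):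
--         super().__init__(comment)
--         self.obj = obj
--
-- # 2-bit error-correction indicator (same pairs as A, read as a number)
-- _ERR_CODE = {"low": 1, "medium": 0, "quartile": 3, "high": 2}
--
-- # Precomputed BCH(15,5) codewords for every possible 5-bit data value
-- # (index = err_code * 8 + mask value); no polynomial division at run time.
-- _FORMAT_TABLE = [
--     0, 1335, 2670, 3929, 4587, 5340, 7045, 7858,
--     9174, 9953, 10680, 11407, 12861, 14090, 14419, 15716,
--     17051, 18348, 18677, 19906, 21360, 22087, 22814, 23593,
--     24909, 25722, 27427, 28180, 28838, 30097, 31432, 32767,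
-- ]
--
-- _MASK_REAL = 0b101010000010010
-- _MASK_MICRO = 0b100010001000101
--
--
-- def _bits(v, n):
--     """The n low bits of v, MSB first, built back-to-front recursively."""
--     if n == 0:
--         return []
--     return _bits(v >> 1, n - 1) + [v & 1]
--
--
-- def _get_format_information_bits(mask_pattern="111", err_level="medium", qr_type="normal"):
--     if err_level not in _ERR_CODE:
--         raise ErrorCorrectionException(INVALID_ERROR_CORRECTION_LEVEL.format(err_level))
--     if len(mask_pattern) != 3 or any(c not in "01" for c in mask_pattern):
--         raise ErrorCorrectionException(INVALID_MASK_PATTERN.format(mask_pattern))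
--
--     idx = _ERR_CODE[err_level] * 8 + int(mask_pattern, 2)
--     mask = _MASK_MICRO if qr_type == "micro" else _MASK_REAL
--     return _bits(_FORMAT_TABLE[idx] ^ mask, 15)
-- ===== Notes on version B (the rewrite author's own statement) =====
-- stated objective: alternative
-- what changed: Replaces the run-time BCH(15,5) polynomial long division and list-zip XOR masking by a precomputed 32-entry codeword table indexed by the 5 data bits (err-level code * 8 + mask value), XORs in the 15-bit mask constant and unpacks the bits MSB-first with a recursive helper that builds the list back-to-front.
import Mathlib
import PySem

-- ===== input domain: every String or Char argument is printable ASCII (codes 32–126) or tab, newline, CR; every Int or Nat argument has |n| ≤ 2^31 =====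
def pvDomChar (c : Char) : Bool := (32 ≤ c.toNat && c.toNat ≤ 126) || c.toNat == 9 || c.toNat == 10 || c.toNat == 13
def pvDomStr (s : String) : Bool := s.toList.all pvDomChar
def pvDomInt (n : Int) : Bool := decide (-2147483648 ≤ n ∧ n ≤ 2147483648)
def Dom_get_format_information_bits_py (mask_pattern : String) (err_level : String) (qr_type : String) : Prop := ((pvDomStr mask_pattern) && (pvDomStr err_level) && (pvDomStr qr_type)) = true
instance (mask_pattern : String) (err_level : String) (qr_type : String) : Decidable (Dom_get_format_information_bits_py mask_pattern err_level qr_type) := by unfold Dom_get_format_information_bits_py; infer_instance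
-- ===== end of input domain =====

-- B replaces A's run-time BCH(15,5) polynomial long division by a precomputed
-- 32-entry codeword table indexed by the 5 data bits, then a recursive MSB-first
-- bit unpack (objective: alternative; table lookup instead of division).

-- ===== PORT A =====
def pvErrLevels : PySem.Dict String (List Int) :=
  (((PySem.Dict.empty.insert "low" [0, 1]).insert "medium" [0, 0]).insert
      "quartile" [1, 1]).insert "high" [1, 0]

-- _xor_bits: [d ^ m for d, m in zip(a, b)]
def pvXorBits (a b : List Int) : List Int :=
  (a.zip b).map (fun p => PySem.Int.bxor p.1 p.2)

-- data_bits_extended[i+j] ^= generator_poly[j]  (exact here: 0 ≤ i+j < len, so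
-- Python indexing is plain in-range indexing and assignment is List.set)
def pvXorAt (l : List Int) (i : Int) (g : Int) : List Int :=
  l.set i.toNat (PySem.Int.bxor (l.getD i.toNat 0) g)

def pvBchGenerator (data_bits : List Int) : List Int :=
  let generator_poly : List Int := [1, 0, 1, 0, 0, 1, 1, 0, 1, 1, 1]
  let ext0 := data_bits ++ List.replicate 10 0
  let ext := (PySem.List.pyRange 0 (data_bits.length : Int) 1).foldl
    (fun ext i =>
      if PySem.List.pyGetD ext i 0 = 1 then
        (PySem.List.pyRange 0 (generator_poly.length : Int) 1).foldl
          (fun ext j => pvXorAt ext (i + j) (PySem.List.pyGetD generator_poly j 0)) ext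
      else ext) ext0
  let parity_bits := PySem.List.slice ext (some (-10)) none
  data_bits ++ parity_bits

def get_format_information_bits_py (mask_pattern : String) (err_level : String) (qr_type : String) : List Int :=
  if (pvErrLevels.get? err_level).isNone then []   -- raise ErrorCorrectionException
  else
    let data_bits := pvErrLevels.getD err_level []
    -- 'not mask_pattern or len(mask_pattern) != 3' ≡ len(mask_pattern) != 3
    if mask_pattern.toList.length ≠ 3 then []      -- raise ErrorCorrectionException
    -- for i in mask_pattern: if i not in ['0', '1']: raise
    else if mask_pattern.toList.any (fun c => !(['0', '1'].contains c)) then []  -- raise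
    else
      -- int(i) for i in mask_pattern (each i is '0' or '1' here)
      let data_bits := data_bits ++ mask_pattern.toList.map
        (fun c => (PySem.Int.ofChars? [c]).getD 0)
      let codeword := pvBchGenerator data_bits
      let mask_real : List Int := [1, 0, 1, 0, 1, 0, 0, 0, 0, 0, 1, 0, 0, 1, 0]
      let mask_micro : List Int := [1, 0, 0, 0, 1, 0, 0, 0, 1, 0, 0, 0, 1, 0, 1]
      if qr_type == "micro" then pvXorBits codeword mask_micro
      else pvXorBits codeword mask_real

-- ===== PORT B =====
def pvErrCode : PySem.Dict String Int :=
  (((PySem.Dict.empty.insert "low" 1).insert "medium" 0).insert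
      "quartile" 3).insert "high" 2

-- Precomputed BCH(15,5) codewords, index = err_code * 8 + mask value
def pvFormatTable : List Int :=
  [0, 1335, 2670, 3929, 4587, 5340, 7045, 7858,
   9174, 9953, 10680, 11407, 12861, 14090, 14419, 15716,
   17051, 18348, 18677, 19906, 21360, 22087, 22814, 23593,
   24909, 25722, 27427, 28180, 28838, 30097, 31432, 32767]

-- _bits(v, n): the n low bits of v, MSB first, built back-to-front recursively
-- (Python's v >> 1 on an int is floor division by 2, exact for all ints)
def pvBits : Int → Nat → List Int
  | _, 0 => []
  | v, Nat.succ n => pvBits (PySem.Int.floordiv v 2) n ++ [PySem.Int.band v 1]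

def get_format_information_bits_py_alt (mask_pattern : String) (err_level : String) (qr_type : String) : List Int :=
  if (pvErrCode.get? err_level).isNone then []  -- raise ErrorCorrectionException
  else if mask_pattern.toList.length ≠ 3 ∨
      mask_pattern.toList.any (fun c => ¬ ("01".toList.contains c)) then []  -- raise
  else
    -- int(mask_pattern, 2): exact here, the string was just validated as 3 binary digits
    let idx : Int := pvErrCode.getD err_level 0 * 8 +
      mask_pattern.toList.foldl (fun d c => d * 2 + (if c = '1' then 1 else 0)) 0
    let mask : Int := if qr_type == "micro" then 17477 else 21522
    -- _FORMAT_TABLE[idx]: exact here, 0 ≤ idx < 32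
    pvBits (PySem.Int.bxor (PySem.List.pyGetD pvFormatTable idx 0) mask) 15

-- ===== PRECONDITION & SPEC =====
-- Pre_ excludes exactly the inputs on which A raises ErrorCorrectionException:
-- unknown err_level, mask_pattern not of length 3, or a non-binary-digit character.
def Pre_get_format_information_bits_py (mask_pattern : String) (err_level : String) (qr_type : String) : Prop :=
  (err_level = "low" ∨ err_level = "medium" ∨ err_level = "quartile" ∨ err_level = "high") ∧
  mask_pattern.toList.length = 3 ∧ mask_pattern.toList.all (fun c => c == '0' || c == '1') = true
instance (mask_pattern : String) (err_level : String) (qr_type : String) : Decidable (Pre_get_format_information_bits_py mask_pattern err_level qr_type) := by unfold Pre_get_format_information_bits_py; infer_instance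

def pvWitness_get_format_information_bits_py : String × String × String := ("101", "medium", "normal")

def Spec_get_format_information_bits_py (mask_pattern : String) (err_level : String) (qr_type : String) (out : List Int) : Prop := out = get_format_information_bits_py_alt mask_pattern err_level qr_type
instance (mask_pattern : String) (err_level : String) (qr_type : String) (out : List Int) : Decidable (Spec_get_format_information_bits_py mask_pattern err_level qr_type out) := by unfold Spec_get_format_information_bits_py; infer_instance

-- ===== CLAIM (what is proved, stated in full; the proofs are below) =====
def Claim_equal_get_format_information_bits_py : Prop := ∀ (mask_pattern : String) (err_level : String) (qr_type : String), Dom_get_format_information_bits_py mask_pattern err_level qr_type → Pre_get_format_information_bits_py mask_pattern err_level qr_type → Spec_get_format_information_bits_py mask_pattern err_level qr_type (get_format_information_bits_py mask_pattern err_level qr_type)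

-- ===== LEMMAS AND PROOFS =====

-- A valid mask pattern is one of the eight 3-bit strings.
theorem pvMaskCases (m : String) (h3 : m.toList.length = 3)
    (hb : m.toList.all (fun c => c == '0' || c == '1') = true) :
    m = "000" ∨ m = "001" ∨ m = "010" ∨ m = "011" ∨
    m = "100" ∨ m = "101" ∨ m = "110" ∨ m = "111" := by
  obtain ⟨a, b, c, hl⟩ := List.length_eq_three.mp h3
  rw [hl] at hb
  simp only [List.all_cons, List.all_nil, Bool.and_true, Bool.and_eq_true,
    Bool.or_eq_true, beq_iff_eq] at hb
  obtain ⟨ha, hbb, hc⟩ := hb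
  rcases ha with rfl | rfl <;> rcases hbb with rfl | rfl <;>
    rcases hc with rfl | rfl <;> simp [← String.toList_inj, hl]

set_option maxRecDepth 8000 in
theorem get_format_information_bits_py_spec : Claim_equal_get_format_information_bits_py := by
  intro m e q _ hpre
  obtain ⟨he, h3, hb⟩ := hpre
  unfold Spec_get_format_information_bits_py
  have hm := pvMaskCases m h3 hb
  obtain rfl | rfl | rfl | rfl := he
  · obtain rfl | rfl | rfl | rfl | rfl | rfl | rfl | rfl := hm
    · cases hq : q == "micro"
      · simp only [get_format_information_bits_py, get_format_information_bits_py_alt, hq]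
        exact Eq.trans (b := [(1 : Int), (1 : Int), (1 : Int), (0 : Int), (1 : Int), (1 : Int), (1 : Int), (1 : Int), (1 : Int), (0 : Int), (0 : Int), (0 : Int), (1 : Int), (0 : Int), (0 : Int)]) (by decide) (by decide)
      · simp only [get_format_information_bits_py, get_format_information_bits_py_alt, hq]
        exact Eq.trans (b := [(1 : Int), (1 : Int), (0 : Int), (0 : Int), (1 : Int), (1 : Int), (1 : Int), (1 : Int), (0 : Int), (0 : Int), (1 : Int), (0 : Int), (0 : Int), (1 : Int), (1 : Int)]) (by decide) (by decide)
    · cases hq : q == "micro"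
      · simp only [get_format_information_bits_py, get_format_information_bits_py_alt, hq]
        exact Eq.trans (b := [(1 : Int), (1 : Int), (1 : Int), (0 : Int), (0 : Int), (1 : Int), (0 : Int), (1 : Int), (1 : Int), (1 : Int), (1 : Int), (0 : Int), (0 : Int), (1 : Int), (1 : Int)]) (by decide) (by decide)
      · simp only [get_format_information_bits_py, get_format_information_bits_py_alt, hq]
        exact Eq.trans (b := [(1 : Int), (1 : Int), (0 : Int), (0 : Int), (0 : Int), (1 : Int), (0 : Int), (1 : Int), (0 : Int), (1 : Int), (0 : Int), (0 : Int), (1 : Int), (0 : Int), (0 : Int)]) (by decide) (by decide)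
    · cases hq : q == "micro"
      · simp only [get_format_information_bits_py, get_format_information_bits_py_alt, hq]
        exact Eq.trans (b := [(1 : Int), (1 : Int), (1 : Int), (1 : Int), (1 : Int), (0 : Int), (1 : Int), (1 : Int), (0 : Int), (1 : Int), (0 : Int), (1 : Int), (0 : Int), (1 : Int), (0 : Int)]) (by decide) (by decide)
      · simp only [get_format_information_bits_py, get_format_information_bits_py_alt, hq]
        exact Eq.trans (b := [(1 : Int), (1 : Int), (0 : Int), (1 : Int), (1 : Int), (0 : Int), (1 : Int), (1 : Int), (1 : Int), (1 : Int), (1 : Int), (1 : Int), (1 : Int), (0 : Int), (1 : Int)]) (by decide) (by decide)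
    · cases hq : q == "micro"
      · simp only [get_format_information_bits_py, get_format_information_bits_py_alt, hq]
        exact Eq.trans (b := [(1 : Int), (1 : Int), (1 : Int), (1 : Int), (0 : Int), (0 : Int), (0 : Int), (1 : Int), (0 : Int), (0 : Int), (1 : Int), (1 : Int), (1 : Int), (0 : Int), (1 : Int)]) (by decide) (by decide)
      · simp only [get_format_information_bits_py, get_format_information_bits_py_alt, hq]
        exact Eq.trans (b := [(1 : Int), (1 : Int), (0 : Int), (1 : Int), (0 : Int), (0 : Int), (0 : Int), (1 : Int), (1 : Int), (0 : Int), (0 : Int), (1 : Int), (0 : Int), (1 : Int), (0 : Int)]) (by decide) (by decide)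
    · cases hq : q == "micro"
      · simp only [get_format_information_bits_py, get_format_information_bits_py_alt, hq]
        exact Eq.trans (b := [(1 : Int), (1 : Int), (0 : Int), (0 : Int), (1 : Int), (1 : Int), (0 : Int), (0 : Int), (0 : Int), (1 : Int), (0 : Int), (1 : Int), (1 : Int), (1 : Int), (1 : Int)]) (by decide) (by decide)
      · simp only [get_format_information_bits_py, get_format_information_bits_py_alt, hq]
        exact Eq.trans (b := [(1 : Int), (1 : Int), (1 : Int), (0 : Int), (1 : Int), (1 : Int), (0 : Int), (0 : Int), (1 : Int), (1 : Int), (1 : Int), (1 : Int), (0 : Int), (0 : Int), (0 : Int)]) (by decide) (by decide)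
    · cases hq : q == "micro"
      · simp only [get_format_information_bits_py, get_format_information_bits_py_alt, hq]
        exact Eq.trans (b := [(1 : Int), (1 : Int), (0 : Int), (0 : Int), (0 : Int), (1 : Int), (1 : Int), (0 : Int), (0 : Int), (0 : Int), (1 : Int), (1 : Int), (0 : Int), (0 : Int), (0 : Int)]) (by decide) (by decide)
      · simp only [get_format_information_bits_py, get_format_information_bits_py_alt, hq]
        exact Eq.trans (b := [(1 : Int), (1 : Int), (1 : Int), (0 : Int), (0 : Int), (1 : Int), (1 : Int), (0 : Int), (1 : Int), (0 : Int), (0 : Int), (1 : Int), (1 : Int), (1 : Int), (1 : Int)]) (by decide) (by decide)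
    · cases hq : q == "micro"
      · simp only [get_format_information_bits_py, get_format_information_bits_py_alt, hq]
        exact Eq.trans (b := [(1 : Int), (1 : Int), (0 : Int), (1 : Int), (1 : Int), (0 : Int), (0 : Int), (0 : Int), (1 : Int), (0 : Int), (0 : Int), (0 : Int), (0 : Int), (0 : Int), (1 : Int)]) (by decide) (by decide)
      · simp only [get_format_information_bits_py, get_format_information_bits_py_alt, hq]
        exact Eq.trans (b := [(1 : Int), (1 : Int), (1 : Int), (1 : Int), (1 : Int), (0 : Int), (0 : Int), (0 : Int), (0 : Int), (0 : Int), (1 : Int), (0 : Int), (1 : Int), (1 : Int), (0 : Int)]) (by decide) (by decide)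
    · cases hq : q == "micro"
      · simp only [get_format_information_bits_py, get_format_information_bits_py_alt, hq]
        exact Eq.trans (b := [(1 : Int), (1 : Int), (0 : Int), (1 : Int), (0 : Int), (0 : Int), (1 : Int), (0 : Int), (1 : Int), (1 : Int), (1 : Int), (0 : Int), (1 : Int), (1 : Int), (0 : Int)]) (by decide) (by decide)
      · simp only [get_format_information_bits_py, get_format_information_bits_py_alt, hq]
        exact Eq.trans (b := [(1 : Int), (1 : Int), (1 : Int), (1 : Int), (0 : Int), (0 : Int), (1 : Int), (0 : Int), (0 : Int), (1 : Int), (0 : Int), (0 : Int), (0 : Int), (0 : Int), (1 : Int)]) (by decide) (by decide)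
  · obtain rfl | rfl | rfl | rfl | rfl | rfl | rfl | rfl := hm
    · cases hq : q == "micro"
      · simp only [get_format_information_bits_py, get_format_information_bits_py_alt, hq]
        exact Eq.trans (b := [(1 : Int), (0 : Int), (1 : Int), (0 : Int), (1 : Int), (0 : Int), (0 : Int), (0 : Int), (0 : Int), (0 : Int), (1 : Int), (0 : Int), (0 : Int), (1 : Int), (0 : Int)]) (by decide) (by decide)
      · simp only [get_format_information_bits_py, get_format_information_bits_py_alt, hq]
        exact Eq.trans (b := [(1 : Int), (0 : Int), (0 : Int), (0 : Int), (1 : Int), (0 : Int), (0 : Int), (0 : Int), (1 : Int), (0 : Int), (0 : Int), (0 : Int), (1 : Int), (0 : Int), (1 : Int)]) (by decide) (by decide)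
    · cases hq : q == "micro"
      · simp only [get_format_information_bits_py, get_format_information_bits_py_alt, hq]
        exact Eq.trans (b := [(1 : Int), (0 : Int), (1 : Int), (0 : Int), (0 : Int), (0 : Int), (1 : Int), (0 : Int), (0 : Int), (1 : Int), (0 : Int), (0 : Int), (1 : Int), (0 : Int), (1 : Int)]) (by decide) (by decide)
      · simp only [get_format_information_bits_py, get_format_information_bits_py_alt, hq]
        exact Eq.trans (b := [(1 : Int), (0 : Int), (0 : Int), (0 : Int), (0 : Int), (0 : Int), (1 : Int), (0 : Int), (1 : Int), (1 : Int), (1 : Int), (0 : Int), (0 : Int), (1 : Int), (0 : Int)]) (by decide) (by decide)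
    · cases hq : q == "micro"
      · simp only [get_format_information_bits_py, get_format_information_bits_py_alt, hq]
        exact Eq.trans (b := [(1 : Int), (0 : Int), (1 : Int), (1 : Int), (1 : Int), (1 : Int), (0 : Int), (0 : Int), (1 : Int), (1 : Int), (1 : Int), (1 : Int), (1 : Int), (0 : Int), (0 : Int)]) (by decide) (by decide)
      · simp only [get_format_information_bits_py, get_format_information_bits_py_alt, hq]
        exact Eq.trans (b := [(1 : Int), (0 : Int), (0 : Int), (1 : Int), (1 : Int), (1 : Int), (0 : Int), (0 : Int), (0 : Int), (1 : Int), (0 : Int), (1 : Int), (0 : Int), (1 : Int), (1 : Int)]) (by decide) (by decide)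
    · cases hq : q == "micro"
      · simp only [get_format_information_bits_py, get_format_information_bits_py_alt, hq]
        exact Eq.trans (b := [(1 : Int), (0 : Int), (1 : Int), (1 : Int), (0 : Int), (1 : Int), (1 : Int), (0 : Int), (1 : Int), (0 : Int), (0 : Int), (1 : Int), (0 : Int), (1 : Int), (1 : Int)]) (by decide) (by decide)
      · simp only [get_format_information_bits_py, get_format_information_bits_py_alt, hq]
        exact Eq.trans (b := [(1 : Int), (0 : Int), (0 : Int), (1 : Int), (0 : Int), (1 : Int), (1 : Int), (0 : Int), (0 : Int), (0 : Int), (1 : Int), (1 : Int), (1 : Int), (0 : Int), (0 : Int)]) (by decide) (by decide)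
    · cases hq : q == "micro"
      · simp only [get_format_information_bits_py, get_format_information_bits_py_alt, hq]
        exact Eq.trans (b := [(1 : Int), (0 : Int), (0 : Int), (0 : Int), (1 : Int), (0 : Int), (1 : Int), (1 : Int), (1 : Int), (1 : Int), (1 : Int), (1 : Int), (0 : Int), (0 : Int), (1 : Int)]) (by decide) (by decide)
      · simp only [get_format_information_bits_py, get_format_information_bits_py_alt, hq]
        exact Eq.trans (b := [(1 : Int), (0 : Int), (1 : Int), (0 : Int), (1 : Int), (0 : Int), (1 : Int), (1 : Int), (0 : Int), (1 : Int), (0 : Int), (1 : Int), (1 : Int), (1 : Int), (0 : Int)]) (by decide) (by decide)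
    · cases hq : q == "micro"
      · simp only [get_format_information_bits_py, get_format_information_bits_py_alt, hq]
        exact Eq.trans (b := [(1 : Int), (0 : Int), (0 : Int), (0 : Int), (0 : Int), (0 : Int), (0 : Int), (1 : Int), (1 : Int), (0 : Int), (0 : Int), (1 : Int), (1 : Int), (1 : Int), (0 : Int)]) (by decide) (by decide)
      · simp only [get_format_information_bits_py, get_format_information_bits_py_alt, hq]
        exact Eq.trans (b := [(1 : Int), (0 : Int), (1 : Int), (0 : Int), (0 : Int), (0 : Int), (0 : Int), (1 : Int), (0 : Int), (0 : Int), (1 : Int), (1 : Int), (0 : Int), (0 : Int), (1 : Int)]) (by decide) (by decide)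
    · cases hq : q == "micro"
      · simp only [get_format_information_bits_py, get_format_information_bits_py_alt, hq]
        exact Eq.trans (b := [(1 : Int), (0 : Int), (0 : Int), (1 : Int), (1 : Int), (1 : Int), (1 : Int), (1 : Int), (0 : Int), (0 : Int), (1 : Int), (0 : Int), (1 : Int), (1 : Int), (1 : Int)]) (by decide) (by decide)
      · simp only [get_format_information_bits_py, get_format_information_bits_py_alt, hq]
        exact Eq.trans (b := [(1 : Int), (0 : Int), (1 : Int), (1 : Int), (1 : Int), (1 : Int), (1 : Int), (1 : Int), (1 : Int), (0 : Int), (0 : Int), (0 : Int), (0 : Int), (0 : Int), (0 : Int)]) (by decide) (by decide)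
    · cases hq : q == "micro"
      · simp only [get_format_information_bits_py, get_format_information_bits_py_alt, hq]
        exact Eq.trans (b := [(1 : Int), (0 : Int), (0 : Int), (1 : Int), (0 : Int), (1 : Int), (0 : Int), (1 : Int), (0 : Int), (1 : Int), (0 : Int), (0 : Int), (0 : Int), (0 : Int), (0 : Int)]) (by decide) (by decide)
      · simp only [get_format_information_bits_py, get_format_information_bits_py_alt, hq]
        exact Eq.trans (b := [(1 : Int), (0 : Int), (1 : Int), (1 : Int), (0 : Int), (1 : Int), (0 : Int), (1 : Int), (1 : Int), (1 : Int), (1 : Int), (0 : Int), (1 : Int), (1 : Int), (1 : Int)]) (by decide) (by decide)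
  · obtain rfl | rfl | rfl | rfl | rfl | rfl | rfl | rfl := hm
    · cases hq : q == "micro"
      · simp only [get_format_information_bits_py, get_format_information_bits_py_alt, hq]
        exact Eq.trans (b := [(0 : Int), (1 : Int), (1 : Int), (0 : Int), (1 : Int), (0 : Int), (1 : Int), (0 : Int), (1 : Int), (0 : Int), (1 : Int), (1 : Int), (1 : Int), (1 : Int), (1 : Int)]) (by decide) (by decide)
      · simp only [get_format_information_bits_py, get_format_information_bits_py_alt, hq]
        exact Eq.trans (b := [(0 : Int), (1 : Int), (0 : Int), (0 : Int), (1 : Int), (0 : Int), (1 : Int), (0 : Int), (0 : Int), (0 : Int), (0 : Int), (1 : Int), (0 : Int), (0 : Int), (0 : Int)]) (by decide) (by decide)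
    · cases hq : q == "micro"
      · simp only [get_format_information_bits_py, get_format_information_bits_py_alt, hq]
        exact Eq.trans (b := [(0 : Int), (1 : Int), (1 : Int), (0 : Int), (0 : Int), (0 : Int), (0 : Int), (0 : Int), (1 : Int), (1 : Int), (0 : Int), (1 : Int), (0 : Int), (0 : Int), (0 : Int)]) (by decide) (by decide)
      · simp only [get_format_information_bits_py, get_format_information_bits_py_alt, hq]
        exact Eq.trans (b := [(0 : Int), (1 : Int), (0 : Int), (0 : Int), (0 : Int), (0 : Int), (0 : Int), (0 : Int), (0 : Int), (1 : Int), (1 : Int), (1 : Int), (1 : Int), (1 : Int), (1 : Int)]) (by decide) (by decide)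
    · cases hq : q == "micro"
      · simp only [get_format_information_bits_py, get_format_information_bits_py_alt, hq]
        exact Eq.trans (b := [(0 : Int), (1 : Int), (1 : Int), (1 : Int), (1 : Int), (1 : Int), (1 : Int), (0 : Int), (0 : Int), (1 : Int), (1 : Int), (0 : Int), (0 : Int), (0 : Int), (1 : Int)]) (by decide) (by decide)
      · simp only [get_format_information_bits_py, get_format_information_bits_py_alt, hq]
        exact Eq.trans (b := [(0 : Int), (1 : Int), (0 : Int), (1 : Int), (1 : Int), (1 : Int), (1 : Int), (0 : Int), (1 : Int), (1 : Int), (0 : Int), (0 : Int), (1 : Int), (1 : Int), (0 : Int)]) (by decide) (by decide)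
    · cases hq : q == "micro"
      · simp only [get_format_information_bits_py, get_format_information_bits_py_alt, hq]
        exact Eq.trans (b := [(0 : Int), (1 : Int), (1 : Int), (1 : Int), (0 : Int), (1 : Int), (0 : Int), (0 : Int), (0 : Int), (0 : Int), (0 : Int), (0 : Int), (1 : Int), (1 : Int), (0 : Int)]) (by decide) (by decide)
      · simp only [get_format_information_bits_py, get_format_information_bits_py_alt, hq]
        exact Eq.trans (b := [(0 : Int), (1 : Int), (0 : Int), (1 : Int), (0 : Int), (1 : Int), (0 : Int), (0 : Int), (1 : Int), (0 : Int), (1 : Int), (0 : Int), (0 : Int), (0 : Int), (1 : Int)]) (by decide) (by decide)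
    · cases hq : q == "micro"
      · simp only [get_format_information_bits_py, get_format_information_bits_py_alt, hq]
        exact Eq.trans (b := [(0 : Int), (1 : Int), (0 : Int), (0 : Int), (1 : Int), (0 : Int), (0 : Int), (1 : Int), (0 : Int), (1 : Int), (1 : Int), (0 : Int), (1 : Int), (0 : Int), (0 : Int)]) (by decide) (by decide)
      · simp only [get_format_information_bits_py, get_format_information_bits_py_alt, hq]
        exact Eq.trans (b := [(0 : Int), (1 : Int), (1 : Int), (0 : Int), (1 : Int), (0 : Int), (0 : Int), (1 : Int), (1 : Int), (1 : Int), (0 : Int), (0 : Int), (0 : Int), (1 : Int), (1 : Int)]) (by decide) (by decide)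
    · cases hq : q == "micro"
      · simp only [get_format_information_bits_py, get_format_information_bits_py_alt, hq]
        exact Eq.trans (b := [(0 : Int), (1 : Int), (0 : Int), (0 : Int), (0 : Int), (0 : Int), (1 : Int), (1 : Int), (0 : Int), (0 : Int), (0 : Int), (0 : Int), (0 : Int), (1 : Int), (1 : Int)]) (by decide) (by decide)
      · simp only [get_format_information_bits_py, get_format_information_bits_py_alt, hq]
        exact Eq.trans (b := [(0 : Int), (1 : Int), (1 : Int), (0 : Int), (0 : Int), (0 : Int), (1 : Int), (1 : Int), (1 : Int), (0 : Int), (1 : Int), (0 : Int), (1 : Int), (0 : Int), (0 : Int)]) (by decide) (by decide)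
    · cases hq : q == "micro"
      · simp only [get_format_information_bits_py, get_format_information_bits_py_alt, hq]
        exact Eq.trans (b := [(0 : Int), (1 : Int), (0 : Int), (1 : Int), (1 : Int), (1 : Int), (0 : Int), (1 : Int), (1 : Int), (0 : Int), (1 : Int), (1 : Int), (0 : Int), (1 : Int), (0 : Int)]) (by decide) (by decide)
      · simp only [get_format_information_bits_py, get_format_information_bits_py_alt, hq]
        exact Eq.trans (b := [(0 : Int), (1 : Int), (1 : Int), (1 : Int), (1 : Int), (1 : Int), (0 : Int), (1 : Int), (0 : Int), (0 : Int), (0 : Int), (1 : Int), (1 : Int), (0 : Int), (1 : Int)]) (by decide) (by decide)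
    · cases hq : q == "micro"
      · simp only [get_format_information_bits_py, get_format_information_bits_py_alt, hq]
        exact Eq.trans (b := [(0 : Int), (1 : Int), (0 : Int), (1 : Int), (0 : Int), (1 : Int), (1 : Int), (1 : Int), (1 : Int), (1 : Int), (0 : Int), (1 : Int), (1 : Int), (0 : Int), (1 : Int)]) (by decide) (by decide)
      · simp only [get_format_information_bits_py, get_format_information_bits_py_alt, hq]
        exact Eq.trans (b := [(0 : Int), (1 : Int), (1 : Int), (1 : Int), (0 : Int), (1 : Int), (1 : Int), (1 : Int), (0 : Int), (1 : Int), (1 : Int), (1 : Int), (0 : Int), (1 : Int), (0 : Int)]) (by decide) (by decide)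
  · obtain rfl | rfl | rfl | rfl | rfl | rfl | rfl | rfl := hm
    · cases hq : q == "micro"
      · simp only [get_format_information_bits_py, get_format_information_bits_py_alt, hq]
        exact Eq.trans (b := [(0 : Int), (0 : Int), (1 : Int), (0 : Int), (1 : Int), (1 : Int), (0 : Int), (1 : Int), (0 : Int), (0 : Int), (0 : Int), (1 : Int), (0 : Int), (0 : Int), (1 : Int)]) (by decide) (by decide)
      · simp only [get_format_information_bits_py, get_format_information_bits_py_alt, hq]
        exact Eq.trans (b := [(0 : Int), (0 : Int), (0 : Int), (0 : Int), (1 : Int), (1 : Int), (0 : Int), (1 : Int), (1 : Int), (0 : Int), (1 : Int), (1 : Int), (1 : Int), (1 : Int), (0 : Int)]) (by decide) (by decide)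
    · cases hq : q == "micro"
      · simp only [get_format_information_bits_py, get_format_information_bits_py_alt, hq]
        exact Eq.trans (b := [(0 : Int), (0 : Int), (1 : Int), (0 : Int), (0 : Int), (1 : Int), (1 : Int), (1 : Int), (0 : Int), (1 : Int), (1 : Int), (1 : Int), (1 : Int), (1 : Int), (0 : Int)]) (by decide) (by decide)
      · simp only [get_format_information_bits_py, get_format_information_bits_py_alt, hq]
        exact Eq.trans (b := [(0 : Int), (0 : Int), (0 : Int), (0 : Int), (0 : Int), (1 : Int), (1 : Int), (1 : Int), (1 : Int), (1 : Int), (0 : Int), (1 : Int), (0 : Int), (0 : Int), (1 : Int)]) (by decide) (by decide)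
    · cases hq : q == "micro"
      · simp only [get_format_information_bits_py, get_format_information_bits_py_alt, hq]
        exact Eq.trans (b := [(0 : Int), (0 : Int), (1 : Int), (1 : Int), (1 : Int), (0 : Int), (0 : Int), (1 : Int), (1 : Int), (1 : Int), (0 : Int), (0 : Int), (1 : Int), (1 : Int), (1 : Int)]) (by decide) (by decide)
      · simp only [get_format_information_bits_py, get_format_information_bits_py_alt, hq]
        exact Eq.trans (b := [(0 : Int), (0 : Int), (0 : Int), (1 : Int), (1 : Int), (0 : Int), (0 : Int), (1 : Int), (0 : Int), (1 : Int), (1 : Int), (0 : Int), (0 : Int), (0 : Int), (0 : Int)]) (by decide) (by decide)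
    · cases hq : q == "micro"
      · simp only [get_format_information_bits_py, get_format_information_bits_py_alt, hq]
        exact Eq.trans (b := [(0 : Int), (0 : Int), (1 : Int), (1 : Int), (0 : Int), (0 : Int), (1 : Int), (1 : Int), (1 : Int), (0 : Int), (1 : Int), (0 : Int), (0 : Int), (0 : Int), (0 : Int)]) (by decide) (by decide)
      · simp only [get_format_information_bits_py, get_format_information_bits_py_alt, hq]
        exact Eq.trans (b := [(0 : Int), (0 : Int), (0 : Int), (1 : Int), (0 : Int), (0 : Int), (1 : Int), (1 : Int), (0 : Int), (0 : Int), (0 : Int), (0 : Int), (1 : Int), (1 : Int), (1 : Int)]) (by decide) (by decide)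
    · cases hq : q == "micro"
      · simp only [get_format_information_bits_py, get_format_information_bits_py_alt, hq]
        exact Eq.trans (b := [(0 : Int), (0 : Int), (0 : Int), (0 : Int), (1 : Int), (1 : Int), (1 : Int), (0 : Int), (1 : Int), (1 : Int), (0 : Int), (0 : Int), (0 : Int), (1 : Int), (0 : Int)]) (by decide) (by decide)
      · simp only [get_format_information_bits_py, get_format_information_bits_py_alt, hq]
        exact Eq.trans (b := [(0 : Int), (0 : Int), (1 : Int), (0 : Int), (1 : Int), (1 : Int), (1 : Int), (0 : Int), (0 : Int), (1 : Int), (1 : Int), (0 : Int), (1 : Int), (0 : Int), (1 : Int)]) (by decide) (by decide)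
    · cases hq : q == "micro"
      · simp only [get_format_information_bits_py, get_format_information_bits_py_alt, hq]
        exact Eq.trans (b := [(0 : Int), (0 : Int), (0 : Int), (0 : Int), (0 : Int), (1 : Int), (0 : Int), (0 : Int), (1 : Int), (0 : Int), (1 : Int), (0 : Int), (1 : Int), (0 : Int), (1 : Int)]) (by decide) (by decide)
      · simp only [get_format_information_bits_py, get_format_information_bits_py_alt, hq]
        exact Eq.trans (b := [(0 : Int), (0 : Int), (1 : Int), (0 : Int), (0 : Int), (1 : Int), (0 : Int), (0 : Int), (0 : Int), (0 : Int), (0 : Int), (0 : Int), (0 : Int), (1 : Int), (0 : Int)]) (by decide) (by decide)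
    · cases hq : q == "micro"
      · simp only [get_format_information_bits_py, get_format_information_bits_py_alt, hq]
        exact Eq.trans (b := [(0 : Int), (0 : Int), (0 : Int), (1 : Int), (1 : Int), (0 : Int), (1 : Int), (0 : Int), (0 : Int), (0 : Int), (0 : Int), (1 : Int), (1 : Int), (0 : Int), (0 : Int)]) (by decide) (by decide)
      · simp only [get_format_information_bits_py, get_format_information_bits_py_alt, hq]
        exact Eq.trans (b := [(0 : Int), (0 : Int), (1 : Int), (1 : Int), (1 : Int), (0 : Int), (1 : Int), (0 : Int), (1 : Int), (0 : Int), (1 : Int), (1 : Int), (0 : Int), (1 : Int), (1 : Int)]) (by decide) (by decide)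
    · cases hq : q == "micro"
      · simp only [get_format_information_bits_py, get_format_information_bits_py_alt, hq]
        exact Eq.trans (b := [(0 : Int), (0 : Int), (0 : Int), (1 : Int), (0 : Int), (0 : Int), (0 : Int), (0 : Int), (0 : Int), (1 : Int), (1 : Int), (1 : Int), (0 : Int), (1 : Int), (1 : Int)]) (by decide) (by decide)
      · simp only [get_format_information_bits_py, get_format_information_bits_py_alt, hq]
        exact Eq.trans (b := [(0 : Int), (0 : Int), (1 : Int), (1 : Int), (0 : Int), (0 : Int), (0 : Int), (0 : Int), (1 : Int), (1 : Int), (0 : Int), (1 : Int), (1 : Int), (0 : Int), (0 : Int)]) (by decide) (by decide)
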